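-- pv_equiv track=rewrite | github.com/Junroot/algorithm-study | programmers/92342/김준근.py | solution
-- ===== SOURCE A (Python) =====
-- def solution(n, info):
--     apeach_score = 0
--     scores = []
--
--     for i, count in enumerate(info):
--         score = 10 - i
--         if count == 0:
--             scores.append(score)
--             continue
--         scores.append(score * 2)
--         apeach_score += score
--
--     def get_max_score(cache_index, left_arrow, used_arrows):
--         if cache_index == 10:
--             return [0, used_arrows + [left_arrow]]
--         result = get_max_score(cache_index + 1, left_arrow, used_arrows + [0])
--         if left_arrow >= info[cache_index] + 1:
--             result2 = get_max_score(cache_index + 1, left_arrow - info[cache_index] - 1, used_arrows + [info[cache_index] + 1])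
--             result2[0] += scores[cache_index]
--             if result2[0] > result[0]:
--                 return result2
--             if result2[0] == result[0]:
--                 for i in range(10, -1, -1):
--                     if result2[1][i] > result[1][i]:
--                         return result2
--                     elif result2[1][i] < result[1][i]:
--                         return result
--         return result
--
--     lion_score = get_max_score(0, n, [])
--     if lion_score[0] <= apeach_score:
--         return [-1]
--     return lion_score[1]
-- ===== SOURCE B (Python) =====
-- POWERS = (512, 256, 128, 64, 32, 16, 8, 4, 2, 1)
--
--
-- def walk(pairs, bits, rem):
--     # one decision list: None if infeasible, else (lion total, arrow counts incl. leftover)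
--     if not pairs:
--         return (0, [rem])
--     c, s = pairs[0]
--     if bits[0]:
--         if rem < c + 1:
--             return None
--         r = walk(pairs[1:], bits[1:], rem - c - 1)
--         if r is None:
--             return None
--         return (r[0] + s, [c + 1] + r[1])
--     r = walk(pairs[1:], bits[1:], rem)
--     if r is None:
--         return None
--     return (r[0], [0] + r[1])
--
--
-- def revgt(xs, ys, i):
--     if i < 0:
--         return False
--     if xs[i] != ys[i]:
--         return xs[i] > ys[i]
--     return revgt(xs, ys, i - 1)
--
--
-- def better(c, b):
--     if c[0] != b[0]:
--         return c[0] > b[0]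
--     return revgt(c[1], b[1], 10)
--
--
-- def solution(n, info):
--     scores = [(10 - i) if c == 0 else 2 * (10 - i) for i, c in enumerate(info)]
--     apeach = sum(10 - i for i, c in enumerate(info) if c != 0)
--     pairs = list(zip(info, scores))[:10]
--     best = None
--     for mask in range(1024):
--         bits = [mask // p % 2 == 1 for p in POWERS]
--         cand = walk(pairs, bits, n)
--         if cand is None:
--             continue
--         if best is None or better(cand, best):
--             best = cand
--     tt, ar = best
--     return [-1] if tt <= apeach else ar
-- ===== Notes on version B (the rewrite author's own statement) =====
-- stated objective: alternative
-- what changed: A's 10-deep branching recursion (get_max_score) with an in-recursion tie-break loop is replaced by a flat iteration over the 1024 win/lose bitmasks, each decoded into a decision list and evaluated by one structural walk, keeping the best candidate under an explicit (total, reverse-lexicographic arrows) comparator.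
import Mathlib
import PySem

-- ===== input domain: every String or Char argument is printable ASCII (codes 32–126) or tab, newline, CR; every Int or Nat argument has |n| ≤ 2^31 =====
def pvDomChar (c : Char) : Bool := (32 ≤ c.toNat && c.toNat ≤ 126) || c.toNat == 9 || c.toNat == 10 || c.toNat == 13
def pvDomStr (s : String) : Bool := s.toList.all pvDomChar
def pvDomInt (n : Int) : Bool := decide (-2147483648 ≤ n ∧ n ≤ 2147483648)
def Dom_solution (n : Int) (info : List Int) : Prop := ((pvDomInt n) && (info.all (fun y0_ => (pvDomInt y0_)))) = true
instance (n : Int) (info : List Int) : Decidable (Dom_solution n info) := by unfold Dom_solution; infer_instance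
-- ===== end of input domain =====

-- B replaces A's branchy recursion by a flat loop over the 1024 win/lose bitmasks with an explicit
-- best-candidate comparator (alternative decomposition, same cost regime).

-- ===== PORT A =====
-- tie-break loop `for i in range(10, -1, -1)` of A; fuel j = i + 1, falling through returns `result` (r1).
-- result2[1][i] / result[1][i] are ported with pyGetD _ _ 0: exact, since both lists always have length 11 there.
def aTie (r2 r1 : Int × List Int) : Nat → Int × List Int
  | 0 => r1
  | j + 1 =>
    let a := PySem.List.pyGetD r2.2 (j : Int) 0
    let b := PySem.List.pyGetD r1.2 (j : Int) 0
    if a > b then r2 else if a < b then r1 else aTie r2 r1 j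

-- get_max_score; structural counter f = 10 - cache_index (Python recurses cache_index 0 → 10).
-- info[cache_index] / scores[cache_index] are ported with pyGetD _ _ 0: exact whenever Python does not
-- raise IndexError (Pre_solution demands 10 ≤ info.length, which puts both accesses in range).
def getMax (info scores : List Int) : Nat → Int → List Int → Int × List Int
  | 0, la, ua => (0, ua ++ [la])
  | f + 1, la, ua =>
    let k : Int := 10 - ((f : Int) + 1)   -- cache_index
    let r1 := getMax info scores f la (ua ++ [0])
    let c := PySem.List.pyGetD info k 0
    if la ≥ c + 1 then
      let r2' := getMax info scores f (la - c - 1) (ua ++ [c + 1])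
      let r2 : Int × List Int := (r2'.1 + PySem.List.pyGetD scores k 0, r2'.2)
      if r2.1 > r1.1 then r2
      else if r2.1 = r1.1 then aTie r2 r1 11
      else r1
    else r1

def solution (n : Int) (info : List Int) : List Int :=
  let st := (PySem.List.enumerate info 0).foldl (fun (st : Int × List Int) p =>
      let score := 10 - p.1
      if p.2 = 0 then (st.1, st.2 ++ [score])
      else (st.1 + score, st.2 ++ [score * 2])) (0, [])
  let lion := getMax info st.2 10 n []
  if lion.1 ≤ st.1 then [-1] else lion.2

-- ===== PORT B =====
def powersB : List Int := [512, 256, 128, 64, 32, 16, 8, 4, 2, 1]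

-- walk(pairs, bits, rem); the `pairs nonempty, bits empty` case is unreachable in B
-- (bits always has 10 ≥ |pairs| entries), where Python would raise IndexError
def walkM : List (Int × Int) → List Bool → Int → Option (Int × List Int)
  | [], _, rem => some (0, [rem])
  | _ :: _, [], _ => none
  | (c, s) :: ps, b :: bs, rem =>
    if b then
      if rem < c + 1 then none
      else
        match walkM ps bs (rem - c - 1) with
        | none => none
        | some r => some (r.1 + s, (c + 1) :: r.2)
    else
      match walkM ps bs rem with
      | none => none
      | some r => some (r.1, 0 :: r.2)

-- revgt(xs, ys, i); fuel j = i + 1.  xs[i]/ys[i] ported with pyGetD _ _ 0: exact, both lists have length 11 at every call.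
def revgtB (xs ys : List Int) : Nat → Bool
  | 0 => false
  | j + 1 =>
    let a := PySem.List.pyGetD xs (j : Int) 0
    let b := PySem.List.pyGetD ys (j : Int) 0
    if a ≠ b then decide (a > b) else revgtB xs ys j

def betterB (c b : Int × List Int) : Bool :=
  if c.1 ≠ b.1 then decide (c.1 > b.1) else revgtB c.2 b.2 11

def solution_alt (n : Int) (info : List Int) : List Int :=
  let scores := (PySem.List.enumerate info 0).map
      (fun p => if p.2 = 0 then 10 - p.1 else 2 * (10 - p.1))
  let apeach := (PySem.List.enumerate info 0).foldl
      (fun (s : Int) p => if p.2 ≠ 0 then s + (10 - p.1) else s) 0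
  let pairs := (info.zip scores).take 10
  let best := (PySem.List.pyRange 0 1024 1).foldl
      (fun (acc : Option (Int × List Int)) mask =>
        let bits := powersB.map (fun p => PySem.Int.mod (PySem.Int.floordiv mask p) 2 == 1)
        match walkM pairs bits n with
        | none => acc
        | some cand =>
          match acc with
          | none => some cand
          | some b => if betterB cand b then some cand else some b) none
  -- Python unpacks `best`; `none` is unreachable (mask 0 is always feasible): TypeError otherwise
  match best with
  | some (tt, ar) => if tt ≤ apeach then [-1] else ar
  | none => []

-- ===== PRECONDITION & SPEC =====
-- A raises IndexError (info[cache_index]) as soon as info has fewer than 10 entries; Pre_ excludes exactly those.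
def Pre_solution (n : Int) (info : List Int) : Prop := 10 ≤ info.length
instance (n : Int) (info : List Int) : Decidable (Pre_solution n info) := by
  unfold Pre_solution; infer_instance

def pvWitness_solution : Int × List Int := (5, [2, 1, 1, 1, 0, 0, 0, 0, 0, 0])

def Spec_solution (n : Int) (info : List Int) (out : List Int) : Prop := out = solution_alt n info
instance (n : Int) (info : List Int) (out : List Int) : Decidable (Spec_solution n info out) := by
  unfold Spec_solution; infer_instance

-- ===== CLAIM (what is proved, stated in full; the proofs are below) =====
def Claim_equal_solution : Prop := ∀ (n : Int) (info : List Int),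
  Dom_solution n info → Pre_solution n info → Spec_solution n info (solution n info)

-- ===== LEMMAS AND PROOFS =====

-- B's per-mask decision list (target 0 first = most significant bit)
def bitsOf (m : Int) : List Bool :=
  powersB.map (fun p => PySem.Int.mod (PySem.Int.floordiv m p) 2 == 1)

-- strictly-better-of-two: the second argument must beat the first strictly (as in both programs)
def mx (a b : Int × List Int) : Int × List Int := if betterB b a then b else a

def P2 : Option (Int × List Int) → Option (Int × List Int) → Option (Int × List Int)
  | none, y => y
  | some a, none => some a
  | some a, some b => some (mx a b)

-- one fold step of B's mask loop, abstracted over the decision list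
def stepL (la : Int) (ua : List Int) (ps : List (Int × Int))
    (acc : Option (Int × List Int)) (bs : List Bool) : Option (Int × List Int) :=
  match walkM ps bs la with
  | none => acc
  | some r => P2 acc (some (r.1, ua ++ r.2))

def bestL (la : Int) (ua : List Int) (ps : List (Int × Int))
    (bss : List (List Bool)) : Option (Int × List Int) :=
  bss.foldl (stepL la ua ps) none

-- all decision lists of length f, in A's leaf order
def allBits : Nat → List (List Bool)
  | 0 => [[]]
  | f + 1 => (allBits f).map (false :: ·) ++ (allBits f).map (true :: ·)

-- structural version of A's recursion, over the list of (count, score) pairs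
def getMaxL : List (Int × Int) → Int → List Int → Int × List Int
  | [], la, ua => (0, ua ++ [la])
  | (c, s) :: ps, la, ua =>
    let r1 := getMaxL ps la (ua ++ [0])
    if la ≥ c + 1 then
      let r2' := getMaxL ps (la - c - 1) (ua ++ [c + 1])
      let r2 : Int × List Int := (r2'.1 + s, r2'.2)
      if betterB r2 r1 then r2 else r1
    else r1

theorem getMaxL_cons (c s la : Int) (ps : List (Int × Int)) (ua : List Int) :
    getMaxL ((c, s) :: ps) la ua =
      if la ≥ c + 1 then
        if betterB ((getMaxL ps (la - c - 1) (ua ++ [c + 1])).1 + s,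
            (getMaxL ps (la - c - 1) (ua ++ [c + 1])).2) (getMaxL ps la (ua ++ [0])) then
          ((getMaxL ps (la - c - 1) (ua ++ [c + 1])).1 + s,
            (getMaxL ps (la - c - 1) (ua ++ [c + 1])).2)
        else getMaxL ps la (ua ++ [0])
      else getMaxL ps la (ua ++ [0]) := rfl

theorem aTie_eq (r2 r1 : Int × List Int) (j : Nat) :
    aTie r2 r1 j = if revgtB r2.2 r1.2 j then r2 else r1 := by
  induction j with
  | zero => simp [aTie, revgtB]
  | succ j ih =>
    simp only [aTie, revgtB, ih, PySem.List.pyGetD_natCast]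
    generalize r2.2.getD j 0 = a
    generalize r1.2.getD j 0 = b
    rcases lt_trichotomy a b with h | h | h
    · simp [h, h.ne, lt_asymm h]
    · simp [h]
    · simp [h, h.ne', lt_asymm h]

theorem combine_eq (r2 r1 : Int × List Int) :
    (if r2.1 > r1.1 then r2 else if r2.1 = r1.1 then aTie r2 r1 11 else r1) =
      if betterB r2 r1 then r2 else r1 := by
  unfold betterB
  rcases lt_trichotomy r2.1 r1.1 with h | h | h
  · simp [h.ne, lt_asymm h, h]
  · simp [h, aTie_eq]
  · simp [h, h.ne']

theorem combine_eq' (t : Int) (l : List Int) (r1 : Int × List Int) :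
    (if t > r1.1 then ((t, l) : Int × List Int)
     else if t = r1.1 then aTie (t, l) r1 11 else r1) =
      if betterB (t, l) r1 then (t, l) else r1 := combine_eq (t, l) r1

theorem revgtB_trans {x y z : List Int} {j : Nat}
    (h1 : revgtB x y j = true) (h2 : revgtB y z j = true) : revgtB x z j = true := by
  induction j with
  | zero => simp [revgtB] at h1
  | succ j ih =>
    simp only [revgtB, PySem.List.pyGetD_natCast, List.getD_eq_getElem?_getD] at h1 h2 ⊢
    set a := x[j]?.getD 0 with ha
    set b := y[j]?.getD 0 with hb
    set c := z[j]?.getD 0 with hc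
    by_cases hab : a = b <;> by_cases hbc : b = c
    · rw [if_neg (not_not.mpr hab)] at h1; rw [if_neg (not_not.mpr hbc)] at h2
      rw [if_neg (not_not.mpr (hab.trans hbc))]; exact ih h1 h2
    · rw [if_pos hbc] at h2
      rw [if_pos (show a ≠ c by rw [hab]; exact hbc), hab]; exact h2
    · rw [if_pos hab] at h1
      rw [if_pos (show a ≠ c from fun h => hab (h.trans hbc.symm)), ← hbc]; exact h1
    · rw [if_pos hab] at h1; rw [if_pos hbc] at h2
      have h1' : a > b := of_decide_eq_true h1
      have h2' : b > c := of_decide_eq_true h2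
      rw [if_pos (show a ≠ c by omega)]
      exact decide_eq_true (by omega)

theorem revgtB_negtrans {x y z : List Int} {j : Nat}
    (h1 : revgtB x y j = false) (h2 : revgtB y z j = false) : revgtB x z j = false := by
  induction j with
  | zero => simp [revgtB]
  | succ j ih =>
    simp only [revgtB, PySem.List.pyGetD_natCast, List.getD_eq_getElem?_getD] at h1 h2 ⊢
    set a := x[j]?.getD 0 with ha
    set b := y[j]?.getD 0 with hb
    set c := z[j]?.getD 0 with hc
    by_cases hab : a = b <;> by_cases hbc : b = c
    · rw [if_neg (not_not.mpr hab)] at h1; rw [if_neg (not_not.mpr hbc)] at h2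
      rw [if_neg (not_not.mpr (hab.trans hbc))]; exact ih h1 h2
    · rw [if_pos hbc] at h2
      rw [if_pos (show a ≠ c by rw [hab]; exact hbc), hab]; exact h2
    · rw [if_pos hab] at h1
      rw [if_pos (show a ≠ c from fun h => hab (h.trans hbc.symm)), ← hbc]; exact h1
    · rw [if_pos hab] at h1; rw [if_pos hbc] at h2
      have h1' : ¬ a > b := of_decide_eq_false h1
      have h2' : ¬ b > c := of_decide_eq_false h2
      by_cases hac : a = c
      · exact absurd (show a = b by omega) hab
      · rw [if_pos hac]; exact decide_eq_false (by omega)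

theorem betterB_trans {a b c : Int × List Int}
    (h1 : betterB a b = true) (h2 : betterB b c = true) : betterB a c = true := by
  unfold betterB at *
  by_cases hab : a.1 = b.1 <;> by_cases hbc : b.1 = c.1
  · rw [if_neg (not_not.mpr hab)] at h1; rw [if_neg (not_not.mpr hbc)] at h2
    rw [if_neg (not_not.mpr (hab.trans hbc))]; exact revgtB_trans h1 h2
  · rw [if_pos hbc] at h2
    have h2' : b.1 > c.1 := of_decide_eq_true h2
    rw [if_pos (show a.1 ≠ c.1 by omega)]; exact decide_eq_true (by omega)
  · rw [if_pos hab] at h1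
    have h1' : a.1 > b.1 := of_decide_eq_true h1
    rw [if_pos (show a.1 ≠ c.1 by omega)]; exact decide_eq_true (by omega)
  · rw [if_pos hab] at h1; rw [if_pos hbc] at h2
    have h1' : a.1 > b.1 := of_decide_eq_true h1
    have h2' : b.1 > c.1 := of_decide_eq_true h2
    rw [if_pos (show a.1 ≠ c.1 by omega)]; exact decide_eq_true (by omega)

theorem betterB_negtrans {a b c : Int × List Int}
    (h1 : betterB a b = false) (h2 : betterB b c = false) : betterB a c = false := by
  unfold betterB at *
  by_cases hab : a.1 = b.1 <;> by_cases hbc : b.1 = c.1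
  · rw [if_neg (not_not.mpr hab)] at h1; rw [if_neg (not_not.mpr hbc)] at h2
    rw [if_neg (not_not.mpr (hab.trans hbc))]; exact revgtB_negtrans h1 h2
  · rw [if_pos hbc] at h2
    have h2' : ¬ b.1 > c.1 := of_decide_eq_false h2
    have hac : a.1 ≠ c.1 := by omega
    rw [if_pos hac]; exact decide_eq_false (by omega)
  · rw [if_pos hab] at h1
    have h1' : ¬ a.1 > b.1 := of_decide_eq_false h1
    have hac : a.1 ≠ c.1 := by omega
    rw [if_pos hac]; exact decide_eq_false (by omega)
  · rw [if_pos hab] at h1; rw [if_pos hbc] at h2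
    have h1' : ¬ a.1 > b.1 := of_decide_eq_false h1
    have h2' : ¬ b.1 > c.1 := of_decide_eq_false h2
    by_cases hac : a.1 = c.1
    · exact absurd (show a.1 = b.1 by omega) hab
    · rw [if_pos hac]; exact decide_eq_false (by omega)

theorem mx_assoc (a b c : Int × List Int) : mx (mx a b) c = mx a (mx b c) := by
  unfold mx
  by_cases h1 : betterB b a = true <;> by_cases h2 : betterB c b = true
  · simp [h1, h2, betterB_trans h2 h1]
  · simp [h1, h2]
  · simp [h1, h2]
  · have h3 : betterB c a = false :=
      betterB_negtrans (Bool.eq_false_iff.mpr h2) (Bool.eq_false_iff.mpr h1)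
    simp [h1, h2, h3]

theorem P2_assoc (x y z : Option (Int × List Int)) : P2 (P2 x y) z = P2 x (P2 y z) := by
  cases x <;> cases y <;> cases z <;> simp [P2, mx_assoc]

theorem stepL_P2 (la : Int) (ua : List Int) (ps : List (Int × Int))
    (x y : Option (Int × List Int)) (bs : List Bool) :
    stepL la ua ps (P2 x y) bs = P2 x (stepL la ua ps y bs) := by
  unfold stepL
  cases hw : walkM ps bs la with
  | none => rfl
  | some r => simp only [P2_assoc]

theorem foldl_P2 {β : Type} (f : Option (Int × List Int) → β → Option (Int × List Int))
    (hf : ∀ x y b, f (P2 x y) b = P2 x (f y b)) :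
    ∀ (L : List β) (x y : Option (Int × List Int)),
      L.foldl f (P2 x y) = P2 x (L.foldl f y) := by
  intro L
  induction L with
  | nil => intro x y; rfl
  | cons b L ih => intro x y; simp only [List.foldl_cons, hf, ih]

theorem walkM_false (c s rem : Int) (ps : List (Int × Int)) (bs : List Bool) :
    walkM ((c, s) :: ps) (false :: bs) rem =
      match walkM ps bs rem with
      | none => none
      | some r => some (r.1, 0 :: r.2) := rfl

theorem walkM_true (c s rem : Int) (ps : List (Int × Int)) (bs : List Bool) :
    walkM ((c, s) :: ps) (true :: bs) rem =
      if rem < c + 1 then none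
      else
        match walkM ps bs (rem - c - 1) with
        | none => none
        | some r => some (r.1 + s, (c + 1) :: r.2) := rfl

theorem betterB_addS (s : Int) (c b : Int × List Int) :
    betterB (c.1 + s, c.2) (b.1 + s, b.2) = betterB c b := by
  unfold betterB
  by_cases h : c.1 = b.1 <;> simp [h] <;> omega

theorem mx_addS (s : Int) (a b : Int × List Int) :
    mx (a.1 + s, a.2) (b.1 + s, b.2) = ((mx a b).1 + s, (mx a b).2) := by
  unfold mx
  rw [betterB_addS]
  by_cases h : betterB b a = true <;> simp [h]

-- the `false :: _` half of the decision lists is the lose-branch fold one level down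
theorem false_step (la c s : Int) (ua : List Int) (ps : List (Int × Int))
    (acc : Option (Int × List Int)) (bs : List Bool) :
    stepL la ua ((c, s) :: ps) acc (false :: bs) = stepL la (ua ++ [0]) ps acc bs := by
  unfold stepL
  rw [walkM_false]
  cases hw : walkM ps bs la with
  | none => rfl
  | some r => simp [List.append_assoc]

-- the `true :: _` half is the win-branch fold one level down, with the target's score added
theorem true_step (la c s : Int) (ua : List Int) (ps : List (Int × Int))
    (hwin : la ≥ c + 1) (y : Option (Int × List Int)) (bs : List Bool) :
    stepL la ua ((c, s) :: ps) (Option.map (fun x => (x.1 + s, x.2)) y) (true :: bs) =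
      Option.map (fun x => (x.1 + s, x.2))
        (stepL (la - c - 1) (ua ++ [c + 1]) ps y bs) := by
  unfold stepL
  rw [walkM_true, if_neg (by omega : ¬ la < c + 1)]
  cases hw : walkM ps bs (la - c - 1) with
  | none => cases y <;> rfl
  | some r =>
    cases y with
    | none =>
      simp only [Option.map_none, P2, Option.map_some, List.cons_append,
        List.append_assoc, List.nil_append]
    | some b =>
      simp only [Option.map_some, P2, List.cons_append, List.append_assoc,
        List.nil_append]
      exact congrArg some (mx_addS s b (r.1, ua ++ (c + 1) :: r.2))

-- with too few arrows for target (c, s), every candidate of the `true` half is infeasible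
theorem true_fold_skip (la c s : Int) (ua : List Int) (ps : List (Int × Int))
    (hla : ¬ la ≥ c + 1) :
    ∀ (A : List (List Bool)) (y : Option (Int × List Int)),
      A.foldl (fun acc bs => stepL la ua ((c, s) :: ps) acc (true :: bs)) y = y := by
  intro A
  induction A with
  | nil => intro y; rfl
  | cons bs A ih =>
    intro y
    have hskip : stepL la ua ((c, s) :: ps) y (true :: bs) = y := by
      unfold stepL
      rw [walkM_true, if_pos (by omega : la < c + 1)]
    simp only [List.foldl_cons, hskip, ih]

theorem true_fold (la c s : Int) (ua : List Int) (ps : List (Int × Int))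
    (hwin : la ≥ c + 1) :
    ∀ (A : List (List Bool)) (y : Option (Int × List Int)),
      A.foldl (fun acc bs => stepL la ua ((c, s) :: ps) acc (true :: bs))
          (Option.map (fun x => (x.1 + s, x.2)) y) =
        Option.map (fun x => (x.1 + s, x.2))
          (A.foldl (stepL (la - c - 1) (ua ++ [c + 1]) ps) y) := by
  intro A
  induction A with
  | nil => intro y; rfl
  | cons bs A ih => intro y; simp only [List.foldl_cons, true_step la c s ua ps hwin, ih]

theorem match_P2 (acc : Option (Int × List Int)) (cand : Int × List Int) :
    (match acc with
     | none => some cand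
     | some b => if betterB cand b then some cand else some b) = P2 acc (some cand) := by
  cases acc with
  | none => rfl
  | some b =>
    unfold P2 mx
    by_cases h : betterB cand b = true <;> simp [h]

theorem stepB_eq (la : Int) (ps : List (Int × Int)) (acc : Option (Int × List Int))
    (bs : List Bool) :
    (match walkM ps bs la with
     | none => acc
     | some cand =>
       match acc with
       | none => some cand
       | some b => if betterB cand b then some cand else some b) =
      stepL la [] ps acc bs := by
  unfold stepL
  cases walkM ps bs la with
  | none => rfl
  | some r => rw [match_P2]; simp

theorem best_allBits (ps : List (Int × Int)) :
    ∀ (la : Int) (ua : List Int),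
      bestL la ua ps (allBits ps.length) = some (getMaxL ps la ua) := by
  induction ps with
  | nil =>
    intro la ua
    simp only [bestL, allBits, List.length_nil, List.foldl_cons, List.foldl_nil]
    unfold stepL walkM
    simp [getMaxL, P2]
  | cons p ps ih =>
    obtain ⟨c, s⟩ := p
    intro la ua
    simp only [bestL, List.length_cons, allBits, List.foldl_append, List.foldl_map]
    have hfalse : ∀ (y : Option (Int × List Int)),
        (allBits ps.length).foldl (fun acc bs => stepL la ua ((c, s) :: ps) acc (false :: bs)) y =
          (allBits ps.length).foldl (stepL la (ua ++ [0]) ps) y := by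
      intro y
      have : (fun acc bs => stepL la ua ((c, s) :: ps) acc (false :: bs)) =
          stepL la (ua ++ [0]) ps := by
        funext acc bs; exact false_step la c s ua ps acc bs
      rw [this]
    rw [hfalse]
    have hr1 : (allBits ps.length).foldl (stepL la (ua ++ [0]) ps) none =
        some (getMaxL ps la (ua ++ [0])) := ih la (ua ++ [0])
    rw [hr1]
    by_cases hwin : la ≥ c + 1
    · have hr2 : (allBits ps.length).foldl (stepL (la - c - 1) (ua ++ [c + 1]) ps) none =
          some (getMaxL ps (la - c - 1) (ua ++ [c + 1])) := ih (la - c - 1) (ua ++ [c + 1])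
      have hstep : ∀ x y bs, (fun acc bs => stepL la ua ((c, s) :: ps) acc (true :: bs)) (P2 x y) bs =
          P2 x ((fun acc bs => stepL la ua ((c, s) :: ps) acc (true :: bs)) y bs) := by
        intro x y bs; exact stepL_P2 la ua ((c, s) :: ps) x y (true :: bs)
      have h1 : some (getMaxL ps la (ua ++ [0])) =
          P2 (some (getMaxL ps la (ua ++ [0]))) none := rfl
      rw [h1, foldl_P2 _ hstep]
      have h2 : (none : Option (Int × List Int)) =
          Option.map (fun (x : Int × List Int) => (x.1 + s, x.2)) none := rfl
      rw [h2, true_fold la c s ua ps hwin, hr2, getMaxL_cons, if_pos hwin]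
      simp only [Option.map_some, P2, mx]
    · rw [true_fold_skip la c s ua ps hwin, getMaxL_cons, if_neg hwin]

set_option maxHeartbeats 4000000 in
set_option maxRecDepth 10000 in
theorem bitsmap : (PySem.List.pyRange 0 1024 1).map bitsOf = allBits 10 := by decide

-- A's one fold both accumulates apeach_score and builds scores; B separates them into a fold and a map
theorem enum_fold (xs : List Int) : ∀ (s a : Int) (l : List Int),
    (PySem.List.enumerate xs s).foldl (fun (st : Int × List Int) p =>
        let score := 10 - p.1
        if p.2 = 0 then (st.1, st.2 ++ [score])
        else (st.1 + score, st.2 ++ [score * 2])) (a, l) =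
      ((PySem.List.enumerate xs s).foldl (fun (t : Int) p => if p.2 ≠ 0 then t + (10 - p.1) else t) a,
       l ++ (PySem.List.enumerate xs s).map (fun p => if p.2 = 0 then 10 - p.1 else 2 * (10 - p.1))) := by
  induction xs with
  | nil => intro s a l; simp [PySem.List.enumerate_nil]
  | cons x xs ih =>
    intro s a l
    by_cases hx : x = 0
    · simp only [PySem.List.enumerate_cons, List.foldl_cons, List.map_cons, hx]
      simp only [if_pos rfl, ite_true, ne_eq, not_true_eq_false, if_false, ih]
      simp
    · simp only [PySem.List.enumerate_cons, List.foldl_cons, List.map_cons]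
      simp only [if_neg hx, ne_eq, hx, not_false_eq_true, if_true, ih]
      have : (10 - s) * 2 = 2 * (10 - s) := by ring
      simp [this]

-- A's indexed recursion is the structural recursion on the first ten (count, score) pairs
theorem getMax_eq (info scores : List Int) (hinfo : 10 ≤ info.length)
    (hsc : 10 ≤ scores.length) :
    ∀ (f : Nat), f ≤ 10 → ∀ (la : Int) (ua : List Int),
      getMax info scores f la ua =
        getMaxL (((info.zip scores).take 10).drop (10 - f)) la ua := by
  have hT : ((info.zip scores).take 10).length = 10 := by
    simp [List.length_take, List.length_zip]; omega
  intro f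
  induction f with
  | zero =>
    intro _ la ua
    rw [List.drop_of_length_le (by omega)]
    rfl
  | succ f ih =>
    intro hf la ua
    have hk : f + 1 ≤ 10 := hf
    have hklt : 9 - f < ((info.zip scores).take 10).length := by omega
    have hcast : (10 : Int) - ((f : Int) + 1) = ((9 - f : Nat) : Int) := by
      push_cast [Nat.cast_sub (by omega : f ≤ 9)]; ring
    have hdrop : ((info.zip scores).take 10).drop (10 - (f + 1)) =
        ((info.zip scores).take 10)[9 - f] :: ((info.zip scores).take 10).drop (10 - f) := by
      have h1 : 10 - (f + 1) = 9 - f := by omega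
      have h2 : (9 - f) + 1 = 10 - f := by omega
      rw [h1, List.drop_eq_getElem_cons hklt, h2]
    have hel : ((info.zip scores).take 10)[9 - f]'hklt =
        (info[9 - f]'(by omega), scores[9 - f]'(by omega)) := by
      simp [List.getElem_take, List.getElem_zip]
    have hgi : PySem.List.pyGetD info ((10 : Int) - ((f : Int) + 1)) 0 = info[9 - f]'(by omega) := by
      rw [hcast, PySem.List.pyGetD_natCast, List.getD_eq_getElem _ _ (by omega)]
    have hgs : PySem.List.pyGetD scores ((10 : Int) - ((f : Int) + 1)) 0 = scores[9 - f]'(by omega) := by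
      rw [hcast, PySem.List.pyGetD_natCast, List.getD_eq_getElem _ _ (by omega)]
    rw [hdrop, hel]
    show (let k : Int := 10 - ((f : Int) + 1)
      let r1 := getMax info scores f la (ua ++ [0])
      let c := PySem.List.pyGetD info k 0
      if la ≥ c + 1 then
        let r2' := getMax info scores f (la - c - 1) (ua ++ [c + 1])
        let r2 : Int × List Int := (r2'.1 + PySem.List.pyGetD scores k 0, r2'.2)
        if r2.1 > r1.1 then r2
        else if r2.1 = r1.1 then aTie r2 r1 11
        else r1
      else r1) = _
    simp only [hgi, hgs, ih (by omega)]
    rw [getMaxL_cons]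
    by_cases hw : la ≥ info[9 - f] + 1
    · rw [if_pos hw, if_pos hw, combine_eq']
    · rw [if_neg hw, if_neg hw]

-- ===== VERDICT (by name: the statement is the Claim_ definition above) =====
theorem solution_spec : Claim_equal_solution := by
  intro n info _ hpre
  have hlen : 10 ≤ info.length := hpre
  unfold Spec_solution solution solution_alt
  simp only []
  rw [enum_fold]
  simp only [List.nil_append]
  set scores := (PySem.List.enumerate info 0).map
      (fun p => if p.2 = 0 then 10 - p.1 else 2 * (10 - p.1)) with hscores
  set apeach := (PySem.List.enumerate info 0).foldl
      (fun (t : Int) p => if p.2 ≠ 0 then t + (10 - p.1) else t) 0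
  have hsl : scores.length = info.length := by
    rw [hscores, List.length_map, PySem.List.length_enumerate]
  set pairs := (info.zip scores).take 10 with hpairs
  have hplen : pairs.length = 10 := by
    rw [hpairs]; simp [List.length_take, List.length_zip]; omega
  -- A side
  have hA : getMax info scores 10 n [] = getMaxL pairs n [] := by
    have := getMax_eq info scores hlen (by omega) 10 (le_refl 10) n []
    simpa [hpairs] using this
  -- B side
  have hB : (PySem.List.pyRange 0 1024 1).foldl
      (fun (acc : Option (Int × List Int)) mask =>
        let bits := powersB.map (fun p => PySem.Int.mod (PySem.Int.floordiv mask p) 2 == 1)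
        match walkM pairs bits n with
        | none => acc
        | some cand =>
          match acc with
          | none => some cand
          | some b => if betterB cand b then some cand else some b) none =
      some (getMaxL pairs n []) := by
    have hstep : (fun (acc : Option (Int × List Int)) (mask : Int) =>
        let bits := powersB.map (fun p => PySem.Int.mod (PySem.Int.floordiv mask p) 2 == 1)
        match walkM pairs bits n with
        | none => acc
        | some cand =>
          match acc with
          | none => some cand
          | some b => if betterB cand b then some cand else some b) =
        (fun acc mask => stepL n [] pairs acc (bitsOf mask)) := by
      funext acc mask
      exact stepB_eq n pairs acc
        (powersB.map (fun p => PySem.Int.mod (PySem.Int.floordiv mask p) 2 == 1))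
    rw [hstep, ← List.foldl_map, bitsmap]
    have := best_allBits pairs n []
    rw [hplen] at this
    exact this
  rw [hA, hB]
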